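-- pv_equiv track=rewrite | github.com/iliopk/movie_recommendation_system | BM25_similarity.py | invdx_plotLenTbl
-- ===== SOURCE A (Python) =====
-- def invdx_plotLenTbl(c):
--     invIndex = dict()
--     plotLength = dict()
--     for plotId in c:
--         # build inverted index
--         for term in c[plotId]:
--             if term in invIndex:
--                 if plotId in invIndex[term]:
--                     invIndex[term][plotId] += 1
--                 else:
--                     invIndex[term][plotId] = 1
--             else:
--                 d = dict()
--                 d[plotId] = 1
--                 invIndex[term] = d
--         # build plot length table
--         length = len(c[plotId])
--         plotLength[plotId] = length
--     return invIndex,plotLength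
-- ===== SOURCE B (Python) =====
-- def invdx_plotLenTbl(c):
--     invIndex = {}
--     plotLength = {}
--     for plotId in c:
--         terms = c[plotId]
--         for term in dict.fromkeys(terms):
--             invIndex.setdefault(term, {})[plotId] = terms.count(term)
--         plotLength[plotId] = len(terms)
--     return invIndex, plotLength
-- ===== Notes on version B (the rewrite author's own statement) =====
-- stated objective: idiomatic
-- what changed: Replaces A's per-occurrence nested if/else increments on the global inverted index by a per-plot dedup-then-count pass: iterate once over dict.fromkeys(terms) and write terms.count(term) via setdefault, so no incremental counter state is threaded through the inner loop.
import Mathlib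
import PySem

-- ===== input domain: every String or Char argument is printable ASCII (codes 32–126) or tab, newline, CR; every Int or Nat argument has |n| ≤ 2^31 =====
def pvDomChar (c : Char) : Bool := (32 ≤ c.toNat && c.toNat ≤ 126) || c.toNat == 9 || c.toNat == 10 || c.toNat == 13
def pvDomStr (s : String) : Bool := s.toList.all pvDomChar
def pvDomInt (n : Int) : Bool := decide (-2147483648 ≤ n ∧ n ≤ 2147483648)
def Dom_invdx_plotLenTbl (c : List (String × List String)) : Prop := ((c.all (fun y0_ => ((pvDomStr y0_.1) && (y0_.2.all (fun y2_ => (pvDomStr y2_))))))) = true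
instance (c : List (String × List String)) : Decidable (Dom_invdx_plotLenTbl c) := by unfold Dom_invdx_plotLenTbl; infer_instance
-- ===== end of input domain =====

-- B replaces A's per-occurrence nested if/else increments by a per-plot dedup-then-count pass
-- written via dict.fromkeys/setdefault/list.count (objective: more idiomatic; not faster).

-- ===== PORT A =====
def invdx_plotLenTbl (c : List (String × List String)) : (List (String × List (String × Int))) × (List (String × Int)) :=
  let st := c.foldl
    (fun (st : PySem.Dict String (PySem.Dict String Int) × PySem.Dict String Int) p =>
      -- for term in c[plotId]:
      let invIndex := p.2.foldl
        (fun inv term =>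
          match inv.get? term with
          | some d =>
            match d.get? p.1 with
            | some n => inv.insert term (d.insert p.1 (n + 1))
            | none   => inv.insert term (d.insert p.1 1)
          | none =>
            let d : PySem.Dict String Int := PySem.Dict.empty
            inv.insert term (d.insert p.1 1)) st.1
      -- length = len(c[plotId]); plotLength[plotId] = length
      let length := PySem.List.len p.2
      (invIndex, st.2.insert p.1 length))
    (PySem.Dict.empty, PySem.Dict.empty)
  (st.1.items.map (fun q => (q.1, q.2.items)), st.2.items)

-- ===== PORT B =====
def invdx_plotLenTbl_alt (c : List (String × List String)) : (List (String × List (String × Int))) × (List (String × Int)) :=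
  let st := c.foldl
    (fun (st : PySem.Dict String (PySem.Dict String Int) × PySem.Dict String Int) p =>
      let terms := p.2
      -- for term in dict.fromkeys(terms): invIndex.setdefault(term, {})[plotId] = terms.count(term)
      let invIndex := (PySem.List.dedup terms).foldl
        (fun inv term =>
          let inv1 := inv.setdefault term PySem.Dict.empty
          inv1.insert term ((inv1.getD term PySem.Dict.empty).insert p.1
            ((PySem.List.count terms term : Nat) : Int))) st.1
      -- plotLength[plotId] = len(terms)
      (invIndex, st.2.insert p.1 (PySem.List.len terms)))
    (PySem.Dict.empty, PySem.Dict.empty)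
  (st.1.items.map (fun q => (q.1, q.2.items)), st.2.items)

-- ===== PRECONDITION & SPEC =====
-- Pre_ excludes association lists with duplicate plot ids: a Python dict cannot hold them (the
-- literal collapses), so the ports' in-order behaviour there corresponds to no Python input.
def Pre_invdx_plotLenTbl (c : List (String × List String)) : Prop := (c.map Prod.fst).Nodup
instance (c : List (String × List String)) : Decidable (Pre_invdx_plotLenTbl c) := by
  unfold Pre_invdx_plotLenTbl; infer_instance
def pvWitness_invdx_plotLenTbl : (List (String × List String)) :=
  [("p1", ["a", "b", "a"]), ("p2", ["b"])]
def Spec_invdx_plotLenTbl (c : List (String × List String)) (out : (List (String × List (String × Int))) × (List (String × Int))) : Prop := out = invdx_plotLenTbl_alt c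
instance (c : List (String × List String)) (out : (List (String × List (String × Int))) × (List (String × Int))) : Decidable (Spec_invdx_plotLenTbl c out) := by unfold Spec_invdx_plotLenTbl; infer_instance

-- ===== CLAIM (what is proved, stated in full; the proofs are below) =====
def Claim_equal_invdx_plotLenTbl : Prop := ∀ (c : List (String × List String)), Dom_invdx_plotLenTbl c → Pre_invdx_plotLenTbl c → Spec_invdx_plotLenTbl c (invdx_plotLenTbl c)

-- ===== LEMMAS AND PROOFS =====

def pvStepA (pid : String) (inv : PySem.Dict String (PySem.Dict String Int)) (t : String) :
    PySem.Dict String (PySem.Dict String Int) :=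
  match inv.get? t with
  | some d =>
    match d.get? pid with
    | some n => inv.insert t (d.insert pid (n + 1))
    | none   => inv.insert t (d.insert pid 1)
  | none => inv.insert t (PySem.Dict.insert PySem.Dict.empty pid 1)

def pvStepN (pid : String) (n : String → Int) (inv : PySem.Dict String (PySem.Dict String Int))
    (t : String) : PySem.Dict String (PySem.Dict String Int) :=
  inv.insert t ((inv.getD t PySem.Dict.empty).insert pid
    ((inv.getD t PySem.Dict.empty).getD pid 0 + n t))

def pvStepC (pid : String) (n : String → Int) (inv : PySem.Dict String (PySem.Dict String Int))
    (t : String) : PySem.Dict String (PySem.Dict String Int) :=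
  inv.insert t ((inv.getD t PySem.Dict.empty).insert pid (n t))

theorem pvStepA_eq (pid : String) (inv : PySem.Dict String (PySem.Dict String Int)) (t : String) :
    pvStepA pid inv t = pvStepN pid (fun _ => 1) inv t := by
  unfold pvStepA pvStepN
  cases hg : inv.get? t with
  | none =>
    simp [PySem.Dict.getD_eq_get?_getD, hg]
  | some d =>
    cases hgd : d.get? pid with
    | none =>
      simp [PySem.Dict.getD_eq_get?_getD, hg, hgd]
    | some n =>
      simp [PySem.Dict.getD_eq_get?_getD, hg, hgd]

theorem pv_rebalance {ν : Type} (d : PySem.Dict String ν) (t u : String) (h : u ≠ t)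
    (w w' v : ν) :
    (d.insert t w).insert u v = ((d.insert t w').insert u v).insert t w := by
  have hut : (u == t) = false := by simp [h]
  have htu : (t == u) = false := by simp [Ne.symm h]
  have hc1 : (d.insert t w).contains u = d.contains u := by
    rw [PySem.Dict.contains_insert]; simp [hut]
  have hc1' : (d.insert t w').contains u = d.contains u := by
    rw [PySem.Dict.contains_insert]; simp [hut]
  have h2 : ((d.insert t w').insert u v).contains t = true := by
    rw [PySem.Dict.contains_insert, PySem.Dict.contains_insert]; simp
  apply PySem.Dict.ext
  cases ht : d.contains t with
  | true =>
    cases hu : d.contains u with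
    | true =>
      rw [PySem.Dict.items_insert_of_contains _ v (hc1.trans hu),
          PySem.Dict.items_insert_of_contains _ w ht,
          PySem.Dict.items_insert_of_contains _ w h2,
          PySem.Dict.items_insert_of_contains _ v (hc1'.trans hu),
          PySem.Dict.items_insert_of_contains _ w' ht]
      simp only [List.map_map]
      apply List.map_congr_left
      intro p _
      by_cases hpt : p.1 = t
      · simp [Function.comp, hpt, htu]
      · by_cases hpu : p.1 = u
        · simp [Function.comp, hpu, hut]
        · simp [Function.comp, hpt, hpu]
    | false =>
      rw [PySem.Dict.items_insert_of_not_contains _ v (hc1.trans hu),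
          PySem.Dict.items_insert_of_contains _ w ht,
          PySem.Dict.items_insert_of_contains _ w h2,
          PySem.Dict.items_insert_of_not_contains _ v (hc1'.trans hu),
          PySem.Dict.items_insert_of_contains _ w' ht]
      simp only [List.map_append, List.map_map, List.map_cons, List.map_nil, hut,
        Bool.false_eq_true, if_false]
      congr 1
      apply List.map_congr_left
      intro p _
      by_cases hpt : p.1 = t
      · simp [Function.comp, hpt]
      · simp [Function.comp, hpt]
  | false =>
    have hkeyst : ∀ p ∈ d.items, (p.1 == t) = false := by
      simpa [PySem.Dict.contains, List.any_eq_false] using ht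
    cases hu : d.contains u with
    | true =>
      rw [PySem.Dict.items_insert_of_contains _ v (hc1.trans hu),
          PySem.Dict.items_insert_of_not_contains _ w ht,
          PySem.Dict.items_insert_of_contains _ w h2,
          PySem.Dict.items_insert_of_contains _ v (hc1'.trans hu),
          PySem.Dict.items_insert_of_not_contains _ w' ht]
      simp only [List.map_append, List.map_map, List.map_cons, List.map_nil]
      congr 1
      · apply List.map_congr_left
        intro p hp
        by_cases hpu : p.1 = u
        · simp [Function.comp, hpu, hut]
        · simp [Function.comp, hpu, hkeyst p hp]
      · simp [htu]
    | false =>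
      rw [PySem.Dict.items_insert_of_not_contains _ v (hc1.trans hu),
          PySem.Dict.items_insert_of_not_contains _ w ht,
          PySem.Dict.items_insert_of_contains _ w h2,
          PySem.Dict.items_insert_of_not_contains _ v (hc1'.trans hu),
          PySem.Dict.items_insert_of_not_contains _ w' ht]
      simp only [List.map_append, List.map_cons, List.map_nil, beq_self_eq_true, if_true,
        hut, Bool.false_eq_true, if_false]
      have hid : List.map (fun p => if (p.1 == t) = true then (t, w) else p) d.items
          = d.items := by
        apply (List.map_congr_left ?_).trans (List.map_id _)
        intro p hp
        simp [hkeyst p hp]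
      rw [hid]

theorem pv_insert_get_self {ν : Type} (d : PySem.Dict String ν) (t : String) (w : ν)
    (hnd : d.keys.Nodup) (h : d.get? t = some w) : d.insert t w = d := by
  have hc : d.contains t = true := by
    rw [PySem.Dict.contains_eq_isSome_get?, h]; rfl
  apply PySem.Dict.ext
  rw [PySem.Dict.items_insert_of_contains _ w hc]
  apply (List.map_congr_left ?_).trans (List.map_id _)
  intro p hp
  by_cases hpt : p.1 = t
  · have : d.get? p.1 = some p.2 := PySem.Dict.get?_of_mem_items d (by simpa using hp) hnd
    rw [hpt, h] at this
    have hw : w = p.2 := Option.some_inj.mp this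
    simp [Prod.ext_iff, hpt, hw]
  · simp [hpt]

theorem pv_dedup_snoc {α : Type} [BEq α] (l : List α) (t : α) :
    PySem.List.dedup (l ++ [t])
      = if (PySem.List.dedup l).contains t then PySem.List.dedup l
        else PySem.List.dedup l ++ [t] := by
  simp only [PySem.List.dedup_eq_ofList, PySem.Set.ofList_eq_foldl, List.foldl_append,
    List.foldl_cons, List.foldl_nil]
  rfl

theorem pv_subst (pid : String) (n : String → Int) :
    ∀ (l : List String) (t : String), t ∉ l →
    ∀ (inv : PySem.Dict String (PySem.Dict String Int)), inv.keys.Nodup →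
    ∀ (w w' : PySem.Dict String Int),
      l.foldl (pvStepN pid n) (inv.insert t w)
        = (l.foldl (pvStepN pid n) (inv.insert t w')).insert t w := by
  intro l
  induction l with
  | nil =>
    intro t ht inv hnd w w'
    simp [PySem.Dict.insert_insert_self]
  | cons u l' ih =>
    intro t ht inv hnd w w'
    have hu : u ≠ t := fun he => ht (by simp [he])
    have hgw : (inv.insert t w).getD u PySem.Dict.empty = inv.getD u PySem.Dict.empty := by
      rw [PySem.Dict.getD_insert]; simp [hu]
    have hgw' : (inv.insert t w').getD u PySem.Dict.empty = inv.getD u PySem.Dict.empty := by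
      rw [PySem.Dict.getD_insert]; simp [hu]
    set V := (inv.getD u PySem.Dict.empty).insert pid
      ((inv.getD u PySem.Dict.empty).getD pid 0 + n u) with hV
    have hstepw : pvStepN pid n (inv.insert t w) u
        = ((inv.insert t w').insert u V).insert t w := by
      unfold pvStepN
      rw [hgw]
      exact pv_rebalance inv t u hu w w' V
    have hstepw' : pvStepN pid n (inv.insert t w') u = (inv.insert t w').insert u V := by
      unfold pvStepN
      rw [hgw']
    have hndi : ((inv.insert t w').insert u V).keys.Nodup :=
      PySem.Dict.nodup_keys_insert _ _ _ (PySem.Dict.nodup_keys_insert _ _ _ hnd)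
    have hget : ((inv.insert t w').insert u V).get? t = some w' := by
      rw [PySem.Dict.get?_insert, if_neg hu.symm, PySem.Dict.get?_insert, if_pos rfl]
    have ht' : t ∉ l' := fun hm => ht (List.mem_cons_of_mem _ hm)
    rw [List.foldl_cons, List.foldl_cons, hstepw, hstepw',
        ih t ht' ((inv.insert t w').insert u V) hndi w w',
        pv_insert_get_self _ t w' hndi hget]

theorem pv_nodup_fold (pid : String) (n : String → Int) (l : List String) :
    ∀ (inv : PySem.Dict String (PySem.Dict String Int)), inv.keys.Nodup →
      (l.foldl (pvStepN pid n) inv).keys.Nodup := by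
  induction l with
  | nil => intro inv h; simpa using h
  | cons x l ih =>
    intro inv h
    rw [List.foldl_cons]
    exact ih _ (PySem.Dict.nodup_keys_insert _ _ _ h)

theorem pv_plot_eq (pid : String) (ts : List String)
    (inv : PySem.Dict String (PySem.Dict String Int)) (hnd : inv.keys.Nodup) :
    ts.foldl (pvStepN pid (fun _ => 1)) inv
      = (PySem.List.dedup ts).foldl
          (pvStepN pid (fun u => ((PySem.List.count ts u : Nat) : Int))) inv := by
  induction ts using List.reverseRecOn with
  | nil => simp [PySem.List.dedup_eq_ofList, PySem.Set.ofList_eq_foldl]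
  | append_singleton ts' t ih =>
    rw [List.foldl_append, List.foldl_cons, List.foldl_nil, ih, pv_dedup_snoc]
    by_cases hmem : t ∈ ts'
    · have hc : (PySem.List.dedup ts').contains t = true := by
        simpa using (PySem.List.mem_dedup ts' t).mpr hmem
      rw [if_pos hc]
      obtain ⟨l1, l2, hdec⟩ := List.append_of_mem ((PySem.List.mem_dedup ts' t).mpr hmem)
      have hnodup : (PySem.List.dedup ts').Nodup := PySem.List.nodup_dedup ts'
      rw [hdec] at hnodup
      have ht1 : t ∉ l1 := fun hm =>
        (List.disjoint_of_nodup_append hnodup) hm List.mem_cons_self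
      have ht2 : t ∉ l2 := (List.nodup_cons.mp hnodup.of_append_right).1
      have hmemdedup : ∀ u, u ∈ l1 ∨ u ∈ l2 → u ∈ ts' := by
        intro u hu
        apply (PySem.List.mem_dedup ts' u).mp
        rw [hdec]
        rcases hu with h1 | h2
        · exact List.mem_append_left _ h1
        · exact List.mem_append_right _ (List.mem_cons_of_mem _ h2)
      rw [hdec]
      -- abbreviations
      set nold : String → Int := fun u => ((PySem.List.count ts' u : Nat) : Int) with hnold
      set nfull : String → Int := fun u => ((PySem.List.count (ts' ++ [t]) u : Nat) : Int) with hnfull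
      have hcnt : ∀ u, u ≠ t → nold u = nfull u := by
        intro u hu
        simp [hnold, hnfull, PySem.List.count, List.count_append, List.count_singleton,
          Ne.symm hu]
      have hcongr1 : ∀ (X : PySem.Dict String (PySem.Dict String Int)),
          l1.foldl (pvStepN pid nold) X = l1.foldl (pvStepN pid nfull) X := by
        intro X
        apply PySem.List.foldl_congr_mem
        intro acc x hx
        unfold pvStepN
        rw [hcnt x (fun he => ht1 (he ▸ hx))]
      have hcongr2 : ∀ (X : PySem.Dict String (PySem.Dict String Int)),
          l2.foldl (pvStepN pid nold) X = l2.foldl (pvStepN pid nfull) X := by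
        intro X
        apply PySem.List.foldl_congr_mem
        intro acc x hx
        unfold pvStepN
        rw [hcnt x (fun he => ht2 (he ▸ hx))]
      rw [List.foldl_append, List.foldl_append, List.foldl_cons, List.foldl_cons,
        hcongr1 inv]
      set M1 := l1.foldl (pvStepN pid nfull) inv with hM1
      have hndM1 : M1.keys.Nodup := pv_nodup_fold pid nfull l1 inv hnd
      set D := M1.getD t PySem.Dict.empty with hD
      set b := D.getD pid 0 with hb
      have hcfull : nfull t = nold t + 1 := by
        simp [hnold, hnfull, PySem.List.count, List.count_append, List.count_singleton]
      -- the two t-steps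
      have hstepold : pvStepN pid nold M1 t = M1.insert t (D.insert pid (b + nold t)) := rfl
      have hstepfull : pvStepN pid nfull M1 t = M1.insert t (D.insert pid (b + nold t + 1)) := by
        unfold pvStepN
        rw [hcfull, ← hD, ← hb, ← add_assoc]
      rw [hstepold, hstepfull, hcongr2]
      set w' := D.insert pid (b + nold t) with hw'
      set w := D.insert pid (b + nold t + 1) with hw
      rw [pv_subst pid nfull l2 t ht2 M1 hndM1 w' w]
      -- final step at t on the left
      unfold pvStepN
      rw [PySem.Dict.getD_insert, if_pos rfl]
      have hwpid : w'.getD pid 0 = b + nold t := by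
        rw [hw', PySem.Dict.getD_insert, if_pos rfl]
      rw [hwpid, hw']
      rw [PySem.Dict.insert_insert_self, PySem.Dict.insert_insert_self]
      exact (pv_subst pid nfull l2 t ht2 M1 hndM1 w w).symm
    · have hc : (PySem.List.dedup ts').contains t = false := by
        simpa using (fun hm => hmem ((PySem.List.mem_dedup ts' t).mp hm))
      simp only [hc, Bool.false_eq_true, if_false]
      rw [List.foldl_append, List.foldl_cons, List.foldl_nil]
      have hcongr : (PySem.List.dedup ts').foldl
            (pvStepN pid (fun u => ((PySem.List.count (ts' ++ [t]) u : Nat) : Int))) inv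
          = (PySem.List.dedup ts').foldl
            (pvStepN pid (fun u => ((PySem.List.count ts' u : Nat) : Int))) inv := by
        apply PySem.List.foldl_congr_mem
        intro acc x hx
        have hxt : x ≠ t := fun he => hmem (he ▸ (PySem.List.mem_dedup ts' x).mp hx)
        unfold pvStepN
        simp [PySem.List.count, List.count_append, Ne.symm hxt]
      rw [hcongr]
      unfold pvStepN
      simp [PySem.List.count, List.count_append,
        List.count_eq_zero_of_not_mem hmem]

theorem pv_fresh_bridge (pid : String) (n : String → Int) (l : List String) :
    ∀ (inv : PySem.Dict String (PySem.Dict String Int)),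
      (∀ u ∈ l, ((inv.getD u PySem.Dict.empty).getD pid 0) = 0) → l.Nodup →
      l.foldl (pvStepN pid n) inv = l.foldl (pvStepC pid n) inv := by
  induction l with
  | nil => intro inv _ _; rfl
  | cons u l' ih =>
    intro inv h hnd
    rw [List.foldl_cons, List.foldl_cons]
    have hstep : pvStepN pid n inv u = pvStepC pid n inv u := by
      unfold pvStepN pvStepC
      rw [h u List.mem_cons_self, zero_add]
    rw [hstep]
    apply ih
    · intro u' hu'
      have hne : u' ≠ u := fun he => (List.nodup_cons.mp hnd).1 (he ▸ hu')
      unfold pvStepC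
      rw [PySem.Dict.getD_insert, if_neg hne]
      exact h u' (List.mem_cons_of_mem _ hu')
    · exact (List.nodup_cons.mp hnd).2

theorem pv_fresh_pres (pid p : String) (hp : p ≠ pid) (n : String → Int) (l : List String) :
    ∀ (inv : PySem.Dict String (PySem.Dict String Int)),
      (∀ u, ((inv.getD u PySem.Dict.empty).getD p 0) = 0) →
      ∀ u, (((l.foldl (pvStepC pid n) inv).getD u PySem.Dict.empty).getD p 0) = 0 := by
  induction l with
  | nil => intro inv h u; exact h u
  | cons t l' ih =>
    intro inv h u
    rw [List.foldl_cons]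
    apply ih
    intro u'
    unfold pvStepC
    rw [PySem.Dict.getD_insert]
    by_cases hu : u' = t
    · rw [if_pos hu, PySem.Dict.getD_insert, if_neg hp]
      exact h t
    · rw [if_neg hu]
      exact h u'

theorem pv_nodup_foldC (pid : String) (n : String → Int) (l : List String) :
    ∀ (inv : PySem.Dict String (PySem.Dict String Int)), inv.keys.Nodup →
      (l.foldl (pvStepC pid n) inv).keys.Nodup := by
  induction l with
  | nil => intro inv h; simpa using h
  | cons x l ih =>
    intro inv h
    rw [List.foldl_cons]
    exact ih _ (PySem.Dict.nodup_keys_insert _ _ _ h)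

theorem pvStepB_eq (pid : String) (terms : List String)
    (inv : PySem.Dict String (PySem.Dict String Int)) (t : String) :
    (let inv1 := inv.setdefault t PySem.Dict.empty
     inv1.insert t ((inv1.getD t PySem.Dict.empty).insert pid
       ((PySem.List.count terms t : Nat) : Int)))
      = pvStepC pid (fun u => ((PySem.List.count terms u : Nat) : Int)) inv t := by
  unfold pvStepC
  cases hc : inv.contains t with
  | true =>
    simp only [PySem.Dict.setdefault_of_contains inv _ hc]
  | false =>
    simp only [PySem.Dict.setdefault_of_not_contains inv _ hc]
    have hg : (inv.insert t PySem.Dict.empty).getD t PySem.Dict.empty = PySem.Dict.empty := by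
      rw [PySem.Dict.getD_insert, if_pos rfl]
    have hg' : inv.getD t PySem.Dict.empty = PySem.Dict.empty :=
      PySem.Dict.getD_of_not_contains _ _ hc
    rw [hg, hg', PySem.Dict.insert_insert_self]

theorem pv_outer :
    ∀ (c : List (String × List String)),
      (c.map Prod.fst).Nodup →
      ∀ (inv : PySem.Dict String (PySem.Dict String Int)) (pl : PySem.Dict String Int),
        inv.keys.Nodup →
        (∀ u p, p ∈ c.map Prod.fst → ((inv.getD u PySem.Dict.empty).getD p 0) = 0) →
        c.foldl
          (fun (st : PySem.Dict String (PySem.Dict String Int) × PySem.Dict String Int) p =>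
            let invIndex := p.2.foldl
              (fun inv term =>
                match inv.get? term with
                | some d =>
                  match d.get? p.1 with
                  | some n => inv.insert term (d.insert p.1 (n + 1))
                  | none   => inv.insert term (d.insert p.1 1)
                | none =>
                  let d : PySem.Dict String Int := PySem.Dict.empty
                  inv.insert term (d.insert p.1 1)) st.1
            let length := PySem.List.len p.2
            (invIndex, st.2.insert p.1 length)) (inv, pl)
        = c.foldl
          (fun (st : PySem.Dict String (PySem.Dict String Int) × PySem.Dict String Int) p =>
            let terms := p.2
            let invIndex := (PySem.List.dedup terms).foldl
              (fun inv term =>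
                let inv1 := inv.setdefault term PySem.Dict.empty
                inv1.insert term ((inv1.getD term PySem.Dict.empty).insert p.1
                  ((PySem.List.count terms term : Nat) : Int))) st.1
            (invIndex, st.2.insert p.1 (PySem.List.len terms))) (inv, pl) := by
  intro c
  induction c with
  | nil => intro _ inv pl _ _; rfl
  | cons p c' ih =>
    intro hnodup inv pl hnd hfresh
    have hnodup' : (p.1 :: c'.map Prod.fst).Nodup := by simpa using hnodup
    have hA : p.2.foldl
        (fun inv term =>
          match inv.get? term with
          | some d =>
            match d.get? p.1 with
            | some n => inv.insert term (d.insert p.1 (n + 1))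
            | none   => inv.insert term (d.insert p.1 1)
          | none =>
            let d : PySem.Dict String Int := PySem.Dict.empty
            inv.insert term (d.insert p.1 1)) inv
        = (PySem.List.dedup p.2).foldl
            (pvStepC p.1 (fun u => ((PySem.List.count p.2 u : Nat) : Int))) inv := by
      calc p.2.foldl _ inv
          = p.2.foldl (pvStepN p.1 (fun _ => 1)) inv :=
            PySem.List.foldl_congr_mem _ _ _ _ (fun acc x _ => pvStepA_eq p.1 acc x)
        _ = (PySem.List.dedup p.2).foldl
              (pvStepN p.1 (fun u => ((PySem.List.count p.2 u : Nat) : Int))) inv :=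
            pv_plot_eq p.1 p.2 inv hnd
        _ = (PySem.List.dedup p.2).foldl
              (pvStepC p.1 (fun u => ((PySem.List.count p.2 u : Nat) : Int))) inv :=
            pv_fresh_bridge p.1 _ _ inv
              (fun u _ => hfresh u p.1 (by simp))
              (PySem.List.nodup_dedup p.2)
    have hB : (PySem.List.dedup p.2).foldl
        (fun inv term =>
          let inv1 := inv.setdefault term PySem.Dict.empty
          inv1.insert term ((inv1.getD term PySem.Dict.empty).insert p.1
            ((PySem.List.count p.2 term : Nat) : Int))) inv
        = (PySem.List.dedup p.2).foldl
            (pvStepC p.1 (fun u => ((PySem.List.count p.2 u : Nat) : Int))) inv :=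
      PySem.List.foldl_congr_mem _ _ _ _ (fun acc x _ => pvStepB_eq p.1 p.2 acc x)
    rw [List.foldl_cons, List.foldl_cons]
    show List.foldl
        (fun (st : PySem.Dict String (PySem.Dict String Int) × PySem.Dict String Int) p =>
            let invIndex := p.2.foldl
              (fun inv term =>
                match inv.get? term with
                | some d =>
                  match d.get? p.1 with
                  | some n => inv.insert term (d.insert p.1 (n + 1))
                  | none   => inv.insert term (d.insert p.1 1)
                | none =>
                  let d : PySem.Dict String Int := PySem.Dict.empty
                  inv.insert term (d.insert p.1 1)) st.1
            let length := PySem.List.len p.2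
            (invIndex, st.2.insert p.1 length))
        (p.2.foldl
          (fun inv term =>
          match inv.get? term with
          | some d =>
            match d.get? p.1 with
            | some n => inv.insert term (d.insert p.1 (n + 1))
            | none   => inv.insert term (d.insert p.1 1)
          | none =>
            let d : PySem.Dict String Int := PySem.Dict.empty
            inv.insert term (d.insert p.1 1)) inv, pl.insert p.1 (PySem.List.len p.2)) c'
      = List.foldl
        (fun (st : PySem.Dict String (PySem.Dict String Int) × PySem.Dict String Int) p =>
            let terms := p.2
            let invIndex := (PySem.List.dedup terms).foldl
              (fun inv term =>
                let inv1 := inv.setdefault term PySem.Dict.empty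
                inv1.insert term ((inv1.getD term PySem.Dict.empty).insert p.1
                  ((PySem.List.count terms term : Nat) : Int))) st.1
            (invIndex, st.2.insert p.1 (PySem.List.len terms)))
        ((PySem.List.dedup p.2).foldl
          (fun inv term =>
          let inv1 := inv.setdefault term PySem.Dict.empty
          inv1.insert term ((inv1.getD term PySem.Dict.empty).insert p.1
            ((PySem.List.count p.2 term : Nat) : Int))) inv, pl.insert p.1 (PySem.List.len p.2)) c'
    rw [hA, hB]
    apply ih (List.nodup_cons.mp hnodup').2
    · exact pv_nodup_foldC _ _ _ inv hnd
    · intro u q hq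
      have hqp : q ≠ p.1 := by
        intro he
        exact (List.nodup_cons.mp hnodup').1 (he ▸ hq)
      exact pv_fresh_pres p.1 q hqp _ (PySem.List.dedup p.2) inv
        (fun u' => hfresh u' q (by simp only [List.map_cons, List.mem_cons]; right; simpa using hq)) u

-- ===== VERDICT (by name: the statement is the Claim_ definition above) =====
theorem invdx_plotLenTbl_spec : Claim_equal_invdx_plotLenTbl := by
  intro c hdom hpre
  unfold Pre_invdx_plotLenTbl at hpre
  unfold Spec_invdx_plotLenTbl invdx_plotLenTbl invdx_plotLenTbl_alt
  rw [pv_outer c hpre PySem.Dict.empty PySem.Dict.empty (by simp)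
    (by intro u p _; simp [PySem.Dict.getD_empty])]
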